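-- pv_equiv track=rewrite | github.com/qmxp55/bgstargets | py/QA.py | masking
-- ===== SOURCE A (Python) =====
-- def masking(title, submasks, details):
--
--     if details or submasks is not None:
--         R = '%s \n\n' %(title)
--     else:
--         R = '%s' %(title)
--
--     if submasks is not None:
--         N = len(submasks)
--     if details is not None:
--         N = len(details)
--
--     if details and submasks is not None:
--         for i in range(N):
--             if i<len(submasks)-1:
--                 R +='%i) %s \n %s \n' %(i+1, submasks[i], details[i])
--             else:
--                 R +='%i) %s \n %s' %(i+1, submasks[i], details[i])
--
--     elif submasks is not None:
--         for i in range(N):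
--             if i<len(submasks)-1:
--                 R +='%i) %s \n' %(i+1, submasks[i])
--             else:
--                 R +='%i) %s' %(i+1, submasks[i])
--
--     elif details is not None:
--         for i in range(N):
--             if i<len(details)-1:
--                 R +='%i) %s \n' %(i+1, details[i])
--             else:
--                 R +='%i) %s' %(i+1, details[i])
--
--     return [R]
-- ===== SOURCE B (Python) =====
-- def masking(title, submasks, details):
--     if details and submasks is not None:
--         items = ['%s \n %s' % pair for pair in zip(submasks, details)]
--     elif submasks is not None and details is None:
--         items = submasks
--     elif details:
--         items = details
--     else:
--         items = []
--     body = ' \n'.join('%i) %s' % (k, item) for k, item in enumerate(items, 1))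
--     header = '%s \n\n' % title if details or submasks is not None else '%s' % title
--     return [header + body]
-- ===== Notes on version B (the rewrite author's own statement) =====
-- stated objective: simpler
-- what changed: Replaces A's three numbering-and-concatenating loops (each with a last-element separator branch) by a staged decomposition: first select the raw item list (zipped pair texts, submasks, or details), then a single unified enumerate-and-join pass adds the numbering and separators; Pre_ excludes only the inputs where A raises IndexError (both lists given with details non-empty and longer than submasks).
-- intended difference: When both lists are given and details is non-empty but shorter than submasks, A's last-element test `i < len(submasks)-1` never fires so A returns the text with a dangling ' \n' after the last line; B (zipping the lists) returns the same text without the dangling separator, the intended formatting. — e.g. on masking("t", some ["a", "b"], some ["x"]): A returns ["t \n\n1) a \n x \n"], B returns ["t \n\n1) a \n x"]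
import Mathlib
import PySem

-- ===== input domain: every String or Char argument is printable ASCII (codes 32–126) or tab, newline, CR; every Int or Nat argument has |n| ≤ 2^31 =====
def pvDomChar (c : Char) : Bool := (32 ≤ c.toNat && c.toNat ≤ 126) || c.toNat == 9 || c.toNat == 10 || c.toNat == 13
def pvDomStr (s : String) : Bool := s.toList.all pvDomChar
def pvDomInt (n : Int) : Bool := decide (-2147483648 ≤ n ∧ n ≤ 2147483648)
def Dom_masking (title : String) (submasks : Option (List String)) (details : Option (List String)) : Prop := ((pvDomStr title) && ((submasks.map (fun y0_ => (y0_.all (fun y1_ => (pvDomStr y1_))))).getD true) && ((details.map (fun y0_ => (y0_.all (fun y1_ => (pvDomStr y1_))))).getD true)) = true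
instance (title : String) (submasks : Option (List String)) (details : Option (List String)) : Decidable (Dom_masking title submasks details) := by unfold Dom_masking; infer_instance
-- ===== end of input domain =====

-- B replaces A's three numbering-and-concatenating loops by a staged decomposition:
-- select the raw item list, then one unified enumerate-and-join pass — objective: simpler.

-- ===== PORT A =====
-- Python truthiness of an Optional[list]: non-None and non-empty
def pyTruthy (o : Option (List String)) : Bool :=
  match o with
  | some (_ :: _) => true
  | _ => false

-- one formatted line '%i) %s \n %s' resp. '%i) %s'
def lineSD (i : Nat) (s d : String) : String :=
  PySem.Int.toStr ((i : Int) + 1) ++ ") " ++ s ++ " \n " ++ d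

def lineS (i : Nat) (s : String) : String :=
  PySem.Int.toStr ((i : Int) + 1) ++ ") " ++ s

-- literal transliteration of A: R starts from the title (with ' \n\n' iff `details or submasks
-- is not None`), N as in A (len(details) if details is not None else len(submasks)), then the
-- three concatenation loops.  `xs.getD i ""` is Python's xs[i]: inside Pre_masking every index
-- reached is in range (out of range Python raises IndexError — excluded by Pre_masking).
def masking (title : String) (submasks : Option (List String)) (details : Option (List String)) : List String :=
  let R0 : String := if pyTruthy details || submasks.isSome then title ++ " \n\n" else title
  let N : Nat :=
    match details, submasks with
    | some d, _ => d.length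
    | none, some s => s.length
    | none, none => 0
  let R : String :=
    if pyTruthy details && submasks.isSome then
      let s := submasks.getD []
      let d := details.getD []
      (List.range N).foldl (fun acc i =>
        if i < s.length - 1 then acc ++ (lineSD i (s.getD i "") (d.getD i "") ++ " \n")
        else acc ++ lineSD i (s.getD i "") (d.getD i "")) R0
    else if submasks.isSome then
      let s := submasks.getD []
      (List.range N).foldl (fun acc i =>
        if i < s.length - 1 then acc ++ (lineS i (s.getD i "") ++ " \n")
        else acc ++ lineS i (s.getD i "")) R0
    else
      match details with
      | some d =>
        (List.range N).foldl (fun acc i =>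
          if i < d.length - 1 then acc ++ (lineS i (d.getD i "") ++ " \n")
          else acc ++ lineS i (d.getD i "")) R0
      | none => R0
  [R]

-- ===== PORT B =====
-- transliteration of Source B: select the raw item list, then one enumerate-and-join pass
def masking_alt (title : String) (submasks : Option (List String)) (details : Option (List String)) : List String :=
  let items : List String :=
    if pyTruthy details && submasks.isSome then
      (List.zip (submasks.getD []) (details.getD [])).map (fun p => p.1 ++ " \n " ++ p.2)
    else if submasks.isSome && details.isNone then
      submasks.getD []
    else if pyTruthy details then
      details.getD []
    else []
  let body : String :=
    PySem.Str.join " \n"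
      ((PySem.List.enumerate items 1).map (fun p => PySem.Int.toStr p.1 ++ ") " ++ p.2))
  let header : String := if pyTruthy details || submasks.isSome then title ++ " \n\n" else title
  [header ++ body]

-- ===== PRECONDITION & SPEC =====
-- Pre_ excludes exactly the inputs where A raises IndexError: both lists given, details
-- non-empty and longer than submasks (the loop runs len(details) times over submasks).
def Pre_masking (title : String) (submasks : Option (List String)) (details : Option (List String)) : Prop :=
  (match submasks, details with
  | some s, some d => decide (d.length ≤ s.length ∨ d = [])
  | _, _ => true) = true

instance (title : String) (submasks : Option (List String)) (details : Option (List String)) : Decidable (Pre_masking title submasks details) := by unfold Pre_masking; infer_instance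

def pvWitness_masking : String × Option (List String) × Option (List String) :=
  ("Totals", some ["BGS", "MASK"], some ["bright", "faint"])

-- When both lists are given and details is non-empty but shorter than submasks, A's
-- last-element test `i < len(submasks)-1` never fires, so A returns with a dangling ' \n'
-- after the last line; B returns the same text without the dangling separator, which is the
-- intended formatting.
def D_masking (title : String) (submasks : Option (List String)) (details : Option (List String)) : Prop :=
  (match submasks, details with
  | some s, some d => decide (d ≠ [] ∧ d.length < s.length)
  | _, _ => false) = true

instance (title : String) (submasks : Option (List String)) (details : Option (List String)) : Decidable (D_masking title submasks details) := by unfold D_masking; infer_instance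

def Spec_masking (title : String) (submasks : Option (List String)) (details : Option (List String)) (out : List String) : Prop := ¬ D_masking title submasks details → out = masking_alt title submasks details
instance (title : String) (submasks : Option (List String)) (details : Option (List String)) (out : List String) : Decidable (Spec_masking title submasks details out) := by unfold Spec_masking; infer_instance

def pvDiffWitness_masking : String × Option (List String) × Option (List String) :=
  ("t", some ["a", "b"], some ["x"])

def pvDiffWitnessOut_masking : (List String) × (List String) :=
  (["t \n\n1) a \n x \n"], ["t \n\n1) a \n x"])

-- ===== CLAIM (what is proved, stated in full; the proofs are below) =====
def Claim_unchanged_masking : Prop := ∀ (title : String) (submasks : Option (List String)) (details : Option (List String)), Dom_masking title submasks details → Pre_masking title submasks details → Spec_masking title submasks details (masking title submasks details)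
def Claim_changed_masking : Prop := Dom_masking (pvDiffWitness_masking.1) (pvDiffWitness_masking.2.1) (pvDiffWitness_masking.2.2) ∧ Pre_masking (pvDiffWitness_masking.1) (pvDiffWitness_masking.2.1) (pvDiffWitness_masking.2.2) ∧ D_masking (pvDiffWitness_masking.1) (pvDiffWitness_masking.2.1) (pvDiffWitness_masking.2.2) ∧ masking (pvDiffWitness_masking.1) (pvDiffWitness_masking.2.1) (pvDiffWitness_masking.2.2) = pvDiffWitnessOut_masking.1 ∧ masking_alt (pvDiffWitness_masking.1) (pvDiffWitness_masking.2.1) (pvDiffWitness_masking.2.2) = pvDiffWitnessOut_masking.2 ∧ pvDiffWitnessOut_masking.1 ≠ pvDiffWitnessOut_masking.2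
def Claim_exact_masking : Prop := ∀ (title : String) (submasks : Option (List String)) (details : Option (List String)), Dom_masking title submasks details → Pre_masking title submasks details → D_masking title submasks details → masking title submasks details ≠ masking_alt title submasks details

-- ===== LEMMAS AND PROOFS =====

-- concatenation of a list of strings (proof-side helper for A's accumulating loops)
def pvCat (l : List String) : String := l.foldr (· ++ ·) ""

theorem pvCat_nil : pvCat [] = "" := rfl

theorem pvCat_cons (a : String) (l : List String) : pvCat (a :: l) = a ++ pvCat l := rfl

theorem join_nil_str : PySem.Str.join " \n" ([] : List String) = "" := by
  apply String.toList_inj.mp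
  simp [PySem.Str.toList_join, PySem.Chars.join_nil]

theorem join_single (a : String) : PySem.Str.join " \n" [a] = a := by
  apply String.toList_inj.mp
  simp [PySem.Str.toList_join, PySem.Chars.join_singleton]

theorem join_cons_ne (a : String) (l : List String) (h : l ≠ []) :
    PySem.Str.join " \n" (a :: l) = a ++ (" \n" ++ PySem.Str.join " \n" l) := by
  cases l with
  | nil => exact absurd rfl h
  | cons b t =>
    apply String.toList_inj.mp
    simp [PySem.Str.toList_join, String.toList_append, PySem.Chars.join_cons_cons]

theorem foldl_allsep (f : Nat → String) :
    ∀ (l : List Nat) (R : String),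
      l.foldl (fun acc i => acc ++ (f i ++ " \n")) R = R ++ pvCat (l.map (fun i => f i ++ " \n"))
  | [], R => by simp [pvCat_nil]
  | a :: t, R => by
    simp only [List.foldl_cons, List.map_cons, pvCat_cons]
    rw [foldl_allsep f t, String.append_assoc]

theorem pvCat_append_last (x : String) :
    ∀ (l : List String),
      pvCat (l.map (fun y => y ++ " \n")) ++ x = PySem.Str.join " \n" (l ++ [x])
  | [] => by simp [pvCat_nil, join_single]
  | a :: t => by
    simp only [List.map_cons, pvCat_cons, List.cons_append]
    rw [String.append_assoc, pvCat_append_last x t, join_cons_ne a (t ++ [x]) (by simp),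
        String.append_assoc]

theorem pvCat_sep_ne :
    ∀ (l : List String), l ≠ [] →
      pvCat (l.map (fun y => y ++ " \n")) = PySem.Str.join " \n" l ++ " \n"
  | [], h => absurd rfl h
  | [a], _ => by simp [pvCat_cons, pvCat_nil, join_single]
  | a :: b :: t, _ => by
    rw [List.map_cons, pvCat_cons, pvCat_sep_ne (b :: t) (by simp),
        join_cons_ne a (b :: t) (by simp)]
    simp [String.append_assoc]

theorem foldl_lastsep (f : Nat → String) (n : Nat) (R : String) :
    (List.range n).foldl (fun acc i => if i < n - 1 then acc ++ (f i ++ " \n") else acc ++ f i) R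
      = R ++ PySem.Str.join " \n" ((List.range n).map f) := by
  cases n with
  | zero => simp [join_nil_str]
  | succ m =>
    rw [List.range_succ, List.foldl_append, List.map_append]
    have hinner : (List.range m).foldl
          (fun acc i => if i < m + 1 - 1 then acc ++ (f i ++ " \n") else acc ++ f i) R
        = (List.range m).foldl (fun acc i => acc ++ (f i ++ " \n")) R :=
      PySem.List.foldl_congr_mem (List.range m) _ _ R
        (by intro acc x hx
            rw [if_pos (by have := List.mem_range.mp hx; omega)])
    rw [hinner, foldl_allsep]
    simp only [List.foldl_cons, List.foldl_nil, List.map_cons, List.map_nil]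
    rw [if_neg (by omega), String.append_assoc,
        show (List.range m).map (fun i => f i ++ " \n")
            = ((List.range m).map f).map (fun y => y ++ " \n") from by simp [List.map_map],
        pvCat_append_last]

-- B's unified enumerate-and-format pass, as a range map
theorem enum1_map (items : List String) :
    (PySem.List.enumerate items 1).map (fun p => PySem.Int.toStr p.1 ++ ") " ++ p.2)
      = (List.range items.length).map (fun i => lineS i (items.getD i "")) := by
  apply List.ext_getElem
  · simp [PySem.List.length_enumerate]
  · intro i h1 h2
    have hi : i < items.length := by simpa [PySem.List.length_enumerate] using h1
    simp [PySem.List.getElem_enumerate, lineS, hi, Int.add_comm]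

theorem zip_map_getD (s d : List String) (h : d.length ≤ s.length) (i : Nat) (hi : i < d.length) :
    ((List.zip s d).map (fun p => p.1 ++ " \n " ++ p.2)).getD i ""
      = s.getD i "" ++ " \n " ++ d.getD i "" := by
  have his : i < s.length := lt_of_lt_of_le hi h
  have hz : i < (List.zip s d).length := by simp; omega
  simp [List.getD_eq_getElem?_getD, List.getElem?_eq_getElem, hz, hi, his, List.getElem_zip]

theorem append_sep_ne (x y : String) : x ++ (y ++ " \n") ≠ x ++ y := by
  intro h
  have h2 := congrArg (fun z => z.toList.length) h
  simp [String.toList_append] at h2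

-- ===== VERDICT (by name: the statement is the Claim_ definition above) =====
theorem masking_spec : Claim_unchanged_masking := by
  intro title submasks details _ hpre hD
  cases submasks with
  | none =>
    cases details with
    | none => simp [masking, masking_alt, pyTruthy, join_nil_str]
    | some d =>
      cases d with
      | nil => simp [masking, masking_alt, pyTruthy, join_nil_str]
      | cons a t =>
        simp only [masking, masking_alt, pyTruthy, Option.isSome_none, Option.isNone_none,
                   Bool.and_false, Bool.false_and, Bool.or_false, Option.getD, reduceIte]
        simp only [Bool.false_eq_true, if_false]
        rw [foldl_lastsep (fun i => lineS i ((a :: t).getD i "")), enum1_map]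
  | some s =>
    cases details with
    | none =>
      simp only [masking, masking_alt, pyTruthy, Option.isSome_some, Option.isNone_none,
                 Bool.and_true, Bool.false_and, Bool.false_or, Option.getD, reduceIte]
      simp only [Bool.false_eq_true, if_false]
      rw [foldl_lastsep (fun i => lineS i (s.getD i "")), enum1_map]
    | some d =>
      cases d with
      | nil => simp [masking, masking_alt, pyTruthy, join_nil_str]
      | cons a t =>
        have hpre' : (a :: t).length ≤ s.length := by
          simpa [Pre_masking] using hpre
        have hD' : ¬((a :: t) ≠ [] ∧ (a :: t).length < s.length) := by
          simpa [D_masking] using hD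
        have hlen : s.length = (a :: t).length := by
          have h2 : ¬((a :: t).length < s.length) := fun hl => hD' ⟨by simp, hl⟩
          omega
        simp only [masking, masking_alt, pyTruthy, Option.isSome_some, Bool.and_self,
                   Bool.true_or, Bool.true_and, Option.getD, reduceIte]
        rw [hlen, foldl_lastsep (fun i => lineSD i (s.getD i "") ((a :: t).getD i "")), enum1_map]
        have hlz : ((List.zip s (a :: t)).map (fun p => p.1 ++ " \n " ++ p.2)).length
            = (a :: t).length := by
          simp only [List.length_map, List.length_zip]
          simp only [List.length_cons] at hpre' ⊢
          omega
        rw [hlz]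
        congr 3
        apply List.map_congr_left
        intro i hi
        have hi' : i < (a :: t).length := List.mem_range.mp hi
        rw [zip_map_getD s (a :: t) hpre' i hi']
        simp [lineS, lineSD, String.append_assoc]

theorem masking_changed : Claim_changed_masking := by unfold Claim_changed_masking; decide

theorem masking_tight : Claim_exact_masking := by
  intro title submasks details _ hpre hD
  cases submasks with
  | none => simp [D_masking] at hD
  | some s =>
    cases details with
    | none => simp [D_masking] at hD
    | some d =>
      cases d with
      | nil => simp [D_masking] at hD
      | cons a t =>
        have hlt : (a :: t).length < s.length := by
          have := (by simpa [D_masking] using hD : (a :: t) ≠ [] ∧ (a :: t).length < s.length)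
          exact this.2
        simp only [masking, masking_alt, pyTruthy, Option.isSome_some, Bool.and_self,
                   Bool.true_or, Bool.true_and, ite_true, Option.getD]
        rw [PySem.List.foldl_congr_mem (List.range (a :: t).length) _
              (fun acc i => acc ++ (lineSD i (s.getD i "") ((a :: t).getD i "") ++ " \n")) _
              (by intro acc x hx
                  have : x < (a :: t).length := List.mem_range.mp hx
                  rw [if_pos (by omega)]),
            foldl_allsep,
            show (List.range (a :: t).length).map
                  (fun i => lineSD i (s.getD i "") ((a :: t).getD i "") ++ " \n")
                = ((List.range (a :: t).length).map
                    (fun i => lineSD i (s.getD i "") ((a :: t).getD i ""))).map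
                    (fun y => y ++ " \n") from by simp [List.map_map],
            pvCat_sep_ne _ (by simp),
            enum1_map]
        rw [show (List.range ((List.zip s (a :: t)).map (fun p => p.1 ++ " \n " ++ p.2)).length).map
              (fun i => lineS i (((List.zip s (a :: t)).map (fun p => p.1 ++ " \n " ++ p.2)).getD i ""))
            = (List.range (a :: t).length).map
              (fun i => lineSD i (s.getD i "") ((a :: t).getD i "")) from ?_]
        · intro h
          exact append_sep_ne _ _ ((List.cons.injEq _ _ _ _).mp h).1
        · have hlz : ((List.zip s (a :: t)).map (fun p => p.1 ++ " \n " ++ p.2)).length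
              = (a :: t).length := by
            simp only [List.length_map, List.length_zip]
            simp only [List.length_cons] at hlt ⊢
            omega
          rw [hlz]
          apply List.map_congr_left
          intro i hi
          have hi' : i < (a :: t).length := List.mem_range.mp hi
          rw [zip_map_getD s (a :: t) (le_of_lt hlt) i hi']
          simp [lineS, lineSD, String.append_assoc]
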